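-- pv_equiv track=rewrite | github.com/quantti/tapas-fpl-app | backend/app/services/calculations.py | calculate_league_positions
-- ===== SOURCE A (Python) =====
-- from typing import Literal, TypedDict
--
-- class ManagerHistoryRow(TypedDict):
--     """Database row structure for manager history."""
--
--     manager_id: int
--     gameweek: int
--     gameweek_points: int
--     total_points: int
--     points_on_bench: int
--     overall_rank: int | None
--     transfers_made: int
--     transfers_cost: int
--     bank: int
--     team_value: int
--     active_chip: str | None
--
-- def calculate_league_positions(
--     history_by_manager: dict[int, list[ManagerHistoryRow]],
--     gameweek: int,
-- ) -> dict[int, int]: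
--     """Calculate league positions for a specific gameweek.
--
--     Uses standard sports ranking (ties get same rank, next rank skipped).
--
--     Args:
--         history_by_manager: Dict mapping manager_id -> history rows
--         gameweek: Gameweek to calculate positions for
--
--     Returns:
--         Dict mapping manager_id -> rank (1 = first place)
--     """
--     if not history_by_manager:
--         return {}
--
--     # Get total_points for each manager at this gameweek
--     manager_points: list[tuple[int, int]] = []
--
--     for manager_id, history in history_by_manager.items():
--         gw_data = next((h for h in history if h["gameweek"] == gameweek), None)
--         if gw_data:
--             manager_points.append((manager_id, gw_data["total_points"]))
--
--     if not manager_points: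
--         return {}
--
--     # Sort by points descending
--     manager_points.sort(key=lambda x: x[1], reverse=True)
--
--     # Assign ranks with tie handling (standard sports ranking)
--     result: dict[int, int] = {}
--     current_rank = 1
--
--     for i, (manager_id, points) in enumerate(manager_points):
--         if i > 0 and points < manager_points[i - 1][1]:
--             # Points lower than previous - rank is position + 1
--             current_rank = i + 1
--
--         result[manager_id] = current_rank
--
--     return result
-- ===== SOURCE B (Python) =====
-- def calculate_league_positions(history_by_manager, gameweek):
--     if not history_by_manager:
--         return {}
--
--     manager_points = []
--     for manager_id, history in history_by_manager.items():
--         gw_data = next((h for h in history if h["gameweek"] == gameweek), None)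
--         if gw_data:
--             manager_points.append((manager_id, gw_data["total_points"]))
--
--     if not manager_points:
--         return {}
--
--     # Group manager ids by points (no full sort: only distinct point values are sorted)
--     groups = {}
--     for manager_id, points in manager_points:
--         groups.setdefault(points, []).append(manager_id)
--
--     result = {}
--     rank = 1
--     for points in sorted(groups, reverse=True):
--         for manager_id in groups[points]:
--             result[manager_id] = rank
--         rank += len(groups[points])
--     return result
-- ===== Notes on version B (the rewrite author's own statement) =====
-- stated objective: alternative
-- what changed: Replaces the full stable sort of all (manager, points) pairs plus the index-based current_rank scan by grouping manager ids into a points->ids dict, sorting only the distinct point values, and assigning each group its rank from cumulative group sizes.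
-- outside the precondition, e.g. on calculate_league_positions({1: [{'gameweek': 1, 'total_points': 5}, {}]}, 1): A returns {1: 1}, B returns {1: 1}; on calculate_league_positions({1: [{'gameweek': 1}]}, 1): A raises KeyError, B raises KeyError; on calculate_league_positions({1: [{'gameweek': 1, 'total_points': None}]}, 1): A returns {1: 1}, B returns {1: 1}
import Mathlib
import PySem

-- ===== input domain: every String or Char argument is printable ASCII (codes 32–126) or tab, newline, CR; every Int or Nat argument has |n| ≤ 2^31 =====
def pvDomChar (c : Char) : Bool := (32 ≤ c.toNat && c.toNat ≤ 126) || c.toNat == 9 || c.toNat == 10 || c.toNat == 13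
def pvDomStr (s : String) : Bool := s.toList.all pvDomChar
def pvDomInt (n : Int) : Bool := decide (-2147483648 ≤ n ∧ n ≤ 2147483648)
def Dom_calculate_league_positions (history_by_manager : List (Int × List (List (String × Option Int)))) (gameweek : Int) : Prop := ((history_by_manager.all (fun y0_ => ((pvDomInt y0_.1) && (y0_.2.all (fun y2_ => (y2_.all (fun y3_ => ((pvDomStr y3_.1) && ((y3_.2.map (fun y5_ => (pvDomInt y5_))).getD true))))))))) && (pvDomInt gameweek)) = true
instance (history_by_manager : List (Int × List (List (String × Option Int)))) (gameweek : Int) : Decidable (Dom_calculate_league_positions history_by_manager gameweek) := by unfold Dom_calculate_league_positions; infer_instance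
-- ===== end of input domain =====

-- B replaces A's full stable sort + current_rank scan by a points→ids grouping dict whose distinct
-- point values alone are sorted, ranks coming from cumulative group sizes (alternative algorithm of
-- similar cost). Equivalence is about the RETURN value (neither Python mutates its argument).

-- ===== PORT A =====
-- h[k] on a row dict (rows are dicts: last duplicate key wins, first position kept)
def pvRowGet (h : List (String × Option Int)) (k : String) : Option (Option Int) :=
  (PySem.Dict.ofList h).get? k

-- extraction loop shared verbatim by A's and B's Python: for each manager, the first history row whose
-- "gameweek" entry equals gameweek contributes (manager_id, its "total_points").
-- Python's `if gw_data:` is always true for a found row (it holds a "gameweek" key), so it needs no port;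
-- a row without "gameweek" reached by the scan, or a matched row without an integer "total_points",
-- raises KeyError (or later TypeError) in Python — those inputs are excluded by Pre_ (the `.getD`
-- defaults below are junk only reachable outside Pre_).
def pvManagerPoints (items : List (Int × List (List (String × Option Int)))) (gameweek : Int) : List (Int × Int) :=
  items.foldl (fun acc it =>
    match it.2.find? (fun h => pvRowGet h "gameweek" == some (some gameweek)) with
    | some gw_data => acc ++ [(it.1, ((pvRowGet gw_data "total_points").getD none).getD 0)]
    | none => acc) []

-- A's ranking loop: `for i, (manager_id, points) in enumerate(manager_points): if i > 0 and
-- points < manager_points[i-1][1]: current_rank = i + 1; result[manager_id] = current_rank`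
def pvALoop (sp : List (Int × Int)) : List (Int × Int) → Nat → Int → PySem.Dict Int Int → PySem.Dict Int Int
  | [], _, _, d => d
  | (mid, pts) :: t, i, rank, d =>
    let rank' := if 0 < i ∧ pts < (PySem.List.pyGetD sp ((i : Int) - 1) (0, 0)).2 then (i : Int) + 1 else rank
    pvALoop sp t (i + 1) rank' (d.insert mid rank')

def calculate_league_positions (history_by_manager : List (Int × List (List (String × Option Int)))) (gameweek : Int) : List (Int × Int) :=
  let d := PySem.Dict.ofList history_by_manager
  if d.items = [] then [] else
  let manager_points := pvManagerPoints d.items gameweek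
  if manager_points = [] then [] else
  let sp := PySem.List.sorted manager_points (fun x => x.2) true
  (pvALoop sp sp 0 1 PySem.Dict.empty).items

-- ===== PORT B =====
def calculate_league_positions_alt (history_by_manager : List (Int × List (List (String × Option Int)))) (gameweek : Int) : List (Int × Int) :=
  let d := PySem.Dict.ofList history_by_manager
  if d.items = [] then [] else
  let manager_points := pvManagerPoints d.items gameweek
  if manager_points = [] then [] else
  -- groups.setdefault(points, []).append(manager_id)
  let groups : PySem.Dict Int (List Int) :=
    manager_points.foldl (fun g q => g.modify q.2 [] (fun l => l ++ [q.1])) PySem.Dict.empty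
  -- for points in sorted(groups, reverse=True): assign rank to the whole group, rank += group size
  let st := (PySem.List.sorted groups.keys (fun k => k) true).foldl
    (fun (st : Int × PySem.Dict Int Int) p =>
      (st.1 + (groups.getD p []).length,
       (groups.getD p []).foldl (fun r m => r.insert m st.1) st.2)) (1, PySem.Dict.empty)
  st.2.items

-- ===== PRECONDITION & SPEC =====
-- Pre_ excludes inputs where some history row of a surviving dict entry lacks a "gameweek" entry or a
-- gameweek-matching row lacks an integer "total_points": there Python raises KeyError, or TypeError when
-- None points reach a comparison; for uniformity this also excludes the few such inputs on which A still
-- returns (offending row after the first match, or a single None-pointed manager never compared) — A and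
-- B return the same value on those as well.
def Pre_calculate_league_positions (history_by_manager : List (Int × List (List (String × Option Int)))) (gameweek : Int) : Prop :=
  ((PySem.Dict.ofList history_by_manager).items.all (fun it =>
    it.2.all (fun h =>
      match pvRowGet h "gameweek" with
      | none => false
      | some v =>
        if v == some gameweek then
          match pvRowGet h "total_points" with
          | some (some _) => true
          | _ => false
        else true))) = true
instance (history_by_manager : List (Int × List (List (String × Option Int)))) (gameweek : Int) : Decidable (Pre_calculate_league_positions history_by_manager gameweek) := by unfold Pre_calculate_league_positions; infer_instance

def pvWitness_calculate_league_positions : (List (Int × List (List (String × Option Int)))) × Int :=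
  ([(1, [[("gameweek", some 1), ("total_points", some 10)]]),
    (2, [[("gameweek", some 2), ("total_points", some 9)], [("gameweek", some 1), ("total_points", some 10)]]),
    (3, [[("gameweek", some 1), ("total_points", some 7)]])], 1)

def Spec_calculate_league_positions (history_by_manager : List (Int × List (List (String × Option Int)))) (gameweek : Int) (out : List (Int × Int)) : Prop := out = calculate_league_positions_alt history_by_manager gameweek
instance (history_by_manager : List (Int × List (List (String × Option Int)))) (gameweek : Int) (out : List (Int × Int)) : Decidable (Spec_calculate_league_positions history_by_manager gameweek out) := by unfold Spec_calculate_league_positions; infer_instance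

-- ===== CLAIM (what is proved, stated in full; the proofs are below) =====
def Claim_equal_calculate_league_positions : Prop := ∀ (history_by_manager : List (Int × List (List (String × Option Int)))) (gameweek : Int), Dom_calculate_league_positions history_by_manager gameweek → Pre_calculate_league_positions history_by_manager gameweek → Spec_calculate_league_positions history_by_manager gameweek (calculate_league_positions history_by_manager gameweek)

-- ===== LEMMAS AND PROOFS =====

-- the group of a point value: the manager pairs carrying exactly these points, in extraction order
def pvGrp (mp : List (Int × Int)) (p : Int) : List (Int × Int) :=
  mp.filter (fun q => q.2 == p)

-- the distinct point values, descending
def pvKs (mp : List (Int × Int)) : List Int :=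
  PySem.List.sorted (PySem.Set.ofList (mp.map (fun q => q.2))) (fun k => k) true

-- common normal form of both ranking loops: walk the point groups in descending point order,
-- inserting every member of a group at rank (#already placed) + 1
def pvBuild (g : Int → List (Int × Int)) : List Int → Nat → PySem.Dict Int Int → PySem.Dict Int Int
  | [], _, d => d
  | p :: t, i, d => pvBuild g t (i + (g p).length) ((g p).foldl (fun d q => d.insert q.1 ((i : Int) + 1)) d)

-- A's loop with the previous element's points carried instead of re-read by index
-- (`prev.getD pts` makes the comparison False when there is no previous element)
def pvPLoop : Option Int → List (Int × Int) → Nat → Int → PySem.Dict Int Int → PySem.Dict Int Int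
  | _, [], _, _, d => d
  | prev, (mid, pts) :: t, i, rank, d =>
    let rank' := if 0 < i ∧ pts < prev.getD pts then (i : Int) + 1 else rank
    pvPLoop (some pts) t (i + 1) rank' (d.insert mid rank')

lemma pvGrp_mem (mp : List (Int × Int)) (p : Int) : ∀ q ∈ pvGrp mp p, q.2 = p := by
  intro q hq; have := List.of_mem_filter hq; simpa using this

lemma pvKs_mem (mp : List (Int × Int)) (p : Int) : p ∈ pvKs mp ↔ p ∈ mp.map (fun q => q.2) := by
  unfold pvKs; rw [PySem.List.mem_sorted, PySem.Set.mem_ofList]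

lemma pvKs_pairwise (mp : List (Int × Int)) : (pvKs mp).Pairwise (fun a b => a > b) := by
  have hge := PySem.List.sorted_pairwise_rev (PySem.Set.ofList (mp.map (fun q => q.2))) (fun k => k)
  have hnd : (pvKs mp).Nodup := by
    unfold pvKs
    exact ((PySem.List.sorted_perm (PySem.Set.ofList (mp.map (fun q => q.2))) (fun k => k) true).nodup_iff).mpr
      (PySem.Set.nodup_ofList _)
  have hge' : (pvKs mp).Pairwise (fun a b => b ≤ a) := hge
  exact (hge'.and hnd).imp (fun h => lt_of_le_of_ne h.1 (Ne.symm h.2))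

lemma pvGrp_ne_nil (mp : List (Int × Int)) (p : Int) (h : p ∈ pvKs mp) : pvGrp mp p ≠ [] := by
  rw [pvKs_mem] at h
  obtain ⟨q, hq, hq2⟩ := List.mem_map.mp h
  exact List.ne_nil_of_mem (List.mem_filter.mpr ⟨hq, by simp [hq2]⟩)

lemma pvALoop_eq_pvPLoop (rest : List (Int × Int)) : ∀ (pre : List (Int × Int)) (rank : Int) d,
    pvALoop (pre ++ rest) rest pre.length rank d
      = pvPLoop ((pre.getLast?).map (fun q => q.2)) rest pre.length rank d := by
  induction rest with
  | nil => intro pre rank d; rfl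
  | cons x t ih =>
    intro pre rank d
    obtain ⟨m, pts⟩ := x
    simp only [pvALoop, pvPLoop]
    have hcond : (0 < pre.length ∧ pts < (PySem.List.pyGetD (pre ++ (m, pts) :: t) ((pre.length : Int) - 1) (0, 0)).2)
        ↔ (0 < pre.length ∧ pts < (((pre.getLast?).map (fun q => q.2)).getD pts)) := by
      by_cases hpre : pre = []
      · simp [hpre]
      · have hlen : 0 < pre.length := List.length_pos_of_ne_nil hpre
        have hcast : ((pre.length : Int) - 1) = ((pre.length - 1 : Nat) : Int) := by omega
        have hidx : (pre.length - 1 : Nat) < (pre ++ (m, pts) :: t).length := by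
          simp; omega
        have hget : PySem.List.pyGetD (pre ++ (m, pts) :: t) ((pre.length : Int) - 1) (0, 0)
            = (pre ++ (m, pts) :: t)[pre.length - 1]'hidx := by
          rw [hcast, PySem.List.pyGetD_natCast]
          exact List.getD_eq_getElem _ _ hidx
        have hlt : pre.length - 1 < pre.length := by omega
        have hgetL : (pre ++ (m, pts) :: t)[pre.length - 1]'hidx = pre[pre.length - 1]'hlt :=
          List.getElem_append_left hlt
        have hlast : pre.getLast? = some (pre[pre.length - 1]'hlt) := by
          rw [List.getLast?_eq_getElem?]
          exact List.getElem?_eq_getElem hlt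
        rw [hget, hgetL, hlast]
        simp
    rw [if_congr hcond rfl rfl]
    have := ih (pre ++ [(m, pts)])
      (if 0 < pre.length ∧ pts < (((pre.getLast?).map (fun q => q.2)).getD pts) then (pre.length : Int) + 1 else rank)
      (d.insert m (if 0 < pre.length ∧ pts < (((pre.getLast?).map (fun q => q.2)).getD pts) then (pre.length : Int) + 1 else rank))
    simp only [List.length_append, List.length_cons, List.length_nil, List.getLast?_concat] at this
    simpa [List.append_assoc] using this

lemma pvPLoop_block (p : Int) (b : List (Int × Int)) : ∀ (rest : List (Int × Int)) (i : Nat) (r : Int) d,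
    (∀ q ∈ b, q.2 = p) →
    pvPLoop (some p) (b ++ rest) i r d
      = pvPLoop (some p) rest (i + b.length) r (b.foldl (fun d q => d.insert q.1 r) d) := by
  induction b with
  | nil => intro rest i r d _; simp
  | cons q t ih =>
    intro rest i r d hb
    obtain ⟨m, pts⟩ := q
    have hq : pts = p := hb (m, pts) (by simp)
    simp only [List.cons_append, pvPLoop, hq]
    rw [if_neg (by simp)]
    rw [ih rest (i + 1) r _ (fun z hz => hb z (by simp [hz]))]
    simp only [List.foldl_cons, List.length_cons]
    congr 1
    omega

lemma pvPLoop_flat (g : Int → List (Int × Int)) (kss : List Int) :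
    ∀ (prev : Option Int) (i : Nat) (rank : Int) d,
    (∀ p ∈ kss, ∀ q ∈ g p, q.2 = p) →
    kss.Pairwise (fun a b => a > b) →
    (∀ p ∈ kss, g p ≠ []) →
    (∀ p ∈ kss, ∀ pp, prev = some pp → p < pp) →
    (prev = none → i = 0) →
    (i = 0 → rank = 1) →
    pvPLoop prev (kss.flatMap g) i rank d = pvBuild g kss i d := by
  induction kss with
  | nil => intro prev i rank d _ _ _ _ _ _; cases prev <;> simp [pvPLoop, pvBuild]
  | cons p t ih =>
    intro prev i rank d hmem hpair hne hprev hpen hr1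
    obtain ⟨b, hb⟩ : ∃ b, g p = b := ⟨g p, rfl⟩
    match b, hb with
    | [], hb => exact absurd hb (hne p (by simp))
    | (m0, p0) :: b', hb =>
      have hp0 : p0 = p := hmem p (by simp) (m0, p0) (by simp [hb])
      have hflat : (p :: t).flatMap g = (m0, p0) :: (b' ++ t.flatMap g) := by
        simp [List.flatMap_cons, hb]
      rw [hflat]
      simp only [pvPLoop]
      have hrank' : (if 0 < i ∧ p0 < prev.getD p0 then (i : Int) + 1 else rank) = (i : Int) + 1 := by
        cases prev with
        | none =>
          have hi := hpen rfl
          have := hr1 hi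
          simp [hi, this]
        | some pp =>
          have hlt : p < pp := hprev p (by simp) pp rfl
          by_cases hi : 0 < i
          · rw [if_pos ⟨hi, by simpa [hp0] using hlt⟩]
          · have hi0 : i = 0 := by omega
            rw [if_neg (by omega)]
            simp [hi0, hr1 hi0]
      rw [hrank']
      have hb'mem : ∀ q ∈ b', q.2 = p0 := by
        intro q hq
        rw [hp0]
        exact hmem p (by simp) q (by simp [hb, hq])
      rw [pvPLoop_block p0 b' _ _ _ _ hb'mem]
      have hp0' : (some p0) = some p := by rw [hp0]
      rw [hp0']
      rw [ih (some p) (i + 1 + b'.length) ((i:Int)+1) _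
        (fun x hx q hq => hmem x (by simp [hx]) q hq)
        (List.Pairwise.sublist (List.sublist_cons_self p t) hpair)
        (fun x hx => hne x (by simp [hx]))
        (fun x hx pp hpp => by cases hpp; exact (List.pairwise_cons.mp hpair).1 x hx)
        (by intro h; cases h)
        (by omega)]
      simp only [pvBuild, hb, List.foldl_cons, List.length_cons]
      congr 1
      omega

lemma pvInsertBy_skip {α : Type} (bef : α → α → Bool) (x : α) (l1 l2 : List α)
    (h : ∀ y ∈ l1, bef x y = false) :
    PySem.List.insertBy bef x (l1 ++ l2) = l1 ++ PySem.List.insertBy bef x l2 := by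
  induction l1 with
  | nil => simp
  | cons y t ih =>
    simp only [List.cons_append, PySem.List.insertBy]
    rw [h y (by simp)]
    simp [ih (fun z hz => h z (by simp [hz]))]

lemma pvInsertBy_front {α : Type} (bef : α → α → Bool) (x : α) (l : List α)
    (h : ∀ y ∈ l, bef x y = true) :
    PySem.List.insertBy bef x l = x :: l := by
  cases l with
  | nil => rfl
  | cons y t => simp only [PySem.List.insertBy]; rw [h y (by simp)]; simp

-- insert an element whose point value already heads one of the blocks: it lands at that block's end
lemma pvIns_flat_mem (g : Int → List (Int × Int)) (x : Int × Int) (kss : List Int)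
    (hmem : ∀ p ∈ kss, ∀ q ∈ g p, q.2 = p)
    (hpair : kss.Pairwise (fun a b => a > b))
    (hx : x.2 ∈ kss) :
    PySem.List.insertBy (fun a b => decide (b.2 < a.2)) x (kss.flatMap g)
      = kss.flatMap (fun p => if p = x.2 then g p ++ [x] else g p) := by
  induction kss with
  | nil => cases hx
  | cons k t ih =>
    rw [List.flatMap_cons, List.flatMap_cons]
    by_cases hk : k = x.2
    · rw [pvInsertBy_skip _ _ _ _ (by
        intro y hy
        have := hmem k (by simp) y hy
        simp [this, hk])]
      have hrest : ∀ y ∈ t.flatMap g, y.2 < x.2 := by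
        intro y hy
        obtain ⟨p, hp, hyp⟩ := List.mem_flatMap.mp hy
        have h1 := hmem p (by simp [hp]) y hyp
        have h2 : k > p := (List.pairwise_cons.mp hpair).1 p hp
        omega
      rw [pvInsertBy_front _ _ _ (fun y hy => by simp [hrest y hy]), if_pos hk]
      have hcong : t.flatMap (fun p => if p = x.2 then g p ++ [x] else g p) = t.flatMap g := by
        apply List.flatMap_congr
        intro p hp
        have h2 : k > p := (List.pairwise_cons.mp hpair).1 p hp
        rw [if_neg (by omega)]
      rw [hcong]
      simp
    · have hxt : x.2 ∈ t := by
        rcases List.mem_cons.mp hx with h | h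
        · exact absurd h.symm hk
        · exact h
      rw [pvInsertBy_skip _ _ _ _ (by
        intro y hy
        have h1 := hmem k (by simp) y hy
        have h2 : k > x.2 := (List.pairwise_cons.mp hpair).1 _ hxt
        simp [h1]; omega)]
      rw [ih (fun p hp q hq => hmem p (by simp [hp]) q hq) (List.pairwise_cons.mp hpair).2 hxt]
      rw [if_neg hk]

-- insert an element with a fresh point value: a new singleton block appears at its sorted place
lemma pvIns_flat_new (g : Int → List (Int × Int)) (x : Int × Int) (kss : List Int)
    (hmem : ∀ p ∈ kss, ∀ q ∈ g p, q.2 = p)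
    (hpair : kss.Pairwise (fun a b => a > b))
    (hx : x.2 ∉ kss) :
    PySem.List.insertBy (fun a b => decide (b.2 < a.2)) x (kss.flatMap g)
      = (PySem.List.insertBy (fun a b => decide (b < a)) x.2 kss).flatMap
          (fun p => if p = x.2 then [x] else g p) := by
  induction kss with
  | nil => simp [PySem.List.insertBy]
  | cons k t ih =>
    have hxk : x.2 ≠ k := fun h => hx (by simp [h])
    have hxt : x.2 ∉ t := fun h => hx (by simp [h])
    by_cases hk : k < x.2
    · have hfront : PySem.List.insertBy (fun a b => decide (b < a)) x.2 (k :: t) = x.2 :: k :: t := by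
        simp [PySem.List.insertBy, hk]
      rw [hfront]
      have hall : ∀ y ∈ (k :: t).flatMap g, y.2 < x.2 := by
        intro y hy
        obtain ⟨p, hp, hyp⟩ := List.mem_flatMap.mp hy
        have h1 := hmem p hp y hyp
        rcases List.mem_cons.mp hp with h | h
        · omega
        · have h2 : k > p := (List.pairwise_cons.mp hpair).1 p h
          omega
      rw [pvInsertBy_front _ _ _ (fun y hy => by simp [hall y hy])]
      simp only [List.flatMap_cons, if_true]
      rw [if_neg (Ne.symm hxk)]
      have hcong : t.flatMap (fun p => if p = x.2 then [x] else g p) = t.flatMap g := by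
        apply List.flatMap_congr
        intro p hp
        have h2 : k > p := (List.pairwise_cons.mp hpair).1 p hp
        rw [if_neg (by omega)]
      rw [hcong]
      simp
    · have hskip : PySem.List.insertBy (fun a b => decide (b < a)) x.2 (k :: t)
          = k :: PySem.List.insertBy (fun a b => decide (b < a)) x.2 t := by
        simp [PySem.List.insertBy, hk]
      rw [hskip, List.flatMap_cons, List.flatMap_cons]
      rw [pvInsertBy_skip _ _ _ _ (by
        intro y hy
        have h1 := hmem k (by simp) y hy
        simp [h1]; omega)]
      rw [ih (fun p hp q hq => hmem p (by simp [hp]) q hq) (List.pairwise_cons.mp hpair).2 hxt]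
      rw [if_neg (Ne.symm hxk)]

-- the stable descending sort is the concatenation of the point groups in descending point order
lemma pvSorted_blocks (mp : List (Int × Int)) :
    PySem.List.sorted mp (fun x => x.2) true = (pvKs mp).flatMap (pvGrp mp) := by
  induction mp using List.reverseRecOn with
  | nil => rfl
  | append_singleton mp x ih =>
    have hstep : PySem.List.sorted (mp ++ [x]) (fun q => q.2) true
        = PySem.List.insertBy (fun a b => decide (b.2 < a.2)) x (PySem.List.sorted mp (fun q => q.2) true) := by
      rw [PySem.List.sorted_rev_eq_foldl_insertBy, PySem.List.sorted_rev_eq_foldl_insertBy,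
        List.foldl_append]
      rfl
    rw [hstep, ih]
    by_cases hx : x.2 ∈ mp.map (fun q => q.2)
    · have hks : pvKs (mp ++ [x]) = pvKs mp := by
        unfold pvKs
        rw [List.map_append]
        show PySem.List.sorted (PySem.Set.ofList (List.map (fun q => q.2) mp ++ [x.2])) (fun k => k) true = _
        rw [PySem.Set.ofList_append_singleton,
          PySem.Set.add_of_mem (by rw [PySem.Set.mem_ofList]; simpa using hx)]
      rw [pvIns_flat_mem (pvGrp mp) x (pvKs mp) (fun p _ => pvGrp_mem mp p)
        (pvKs_pairwise mp) ((pvKs_mem mp x.2).mpr hx)]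
      rw [hks]
      apply List.flatMap_congr
      intro p _
      unfold pvGrp
      rw [List.filter_append]
      by_cases hp : p = x.2
      · rw [if_pos hp, hp]; simp
      · rw [if_neg hp]; simp [Ne.symm hp]
    · have hks : pvKs (mp ++ [x]) = PySem.List.insertBy (fun a b => decide (b < a)) x.2 (pvKs mp) := by
        unfold pvKs
        rw [List.map_append]
        show PySem.List.sorted (PySem.Set.ofList (List.map (fun q => q.2) mp ++ [x.2])) (fun k => k) true = _
        rw [PySem.Set.ofList_append_singleton,
          PySem.Set.add_of_not_mem (by rw [PySem.Set.mem_ofList]; simpa using hx),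
          PySem.List.sorted_rev_eq_foldl_insertBy, PySem.List.sorted_rev_eq_foldl_insertBy,
          List.foldl_append]
        rfl
      rw [pvIns_flat_new (pvGrp mp) x (pvKs mp) (fun p _ => pvGrp_mem mp p)
        (pvKs_pairwise mp) (fun h => hx ((pvKs_mem mp x.2).mp h))]
      rw [hks]
      apply List.flatMap_congr
      intro p _
      unfold pvGrp
      rw [List.filter_append]
      by_cases hp : p = x.2
      · rw [if_pos hp, hp]
        have hemp : mp.filter (fun q => q.2 == x.2) = [] := by
          rw [List.filter_eq_nil_iff]
          intro q hq hbeq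
          exact hx (List.mem_map.mpr ⟨q, hq, by simpa using hbeq⟩)
        simp [hemp]
      · rw [if_neg hp]; simp [Ne.symm hp]

-- B's group dict: its value at p is the ids of group p, its key list the distinct points
lemma pvGroups_getD (mp : List (Int × Int)) (p : Int) :
    (mp.foldl (fun g q => g.modify q.2 [] (fun l => l ++ [q.1])) PySem.Dict.empty).getD p []
      = (pvGrp mp p).map (fun q => q.1) := by
  have h1 : mp.foldl (fun g q => g.modify q.2 [] (fun l => l ++ [q.1])) PySem.Dict.empty
      = (mp.map Prod.swap).foldl (fun g q => g.modify q.1 [] (fun l => l ++ [q.2])) PySem.Dict.empty := by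
    rw [List.foldl_map]; rfl
  rw [h1, PySem.Dict.getD_foldl_modify_append]
  unfold pvGrp
  rw [List.filter_map]
  simp [Function.comp_def]

lemma pvGroups_keys (mp : List (Int × Int)) :
    (mp.foldl (fun g q => g.modify q.2 [] (fun l => l ++ [q.1])) PySem.Dict.empty).keys
      = PySem.Set.ofList (mp.map (fun q => q.2)) := by
  rw [PySem.Dict.keys_foldl_modify_key mp (fun q => q.2) [] (fun _ q => fun l => l ++ [q.1]) PySem.Dict.empty]
  simp [PySem.Set.update_nil_left, PySem.Dict.keys_empty]

-- B's ranking loop over the sorted distinct points is the common normal form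
lemma pvBLoop (mp : List (Int × Int)) (kss : List Int) : ∀ (i : Nat) d,
    (kss.foldl
      (fun (st : Int × PySem.Dict Int Int) p =>
        (st.1 + ((pvGrp mp p).map (fun q => q.1)).length,
         ((pvGrp mp p).map (fun q => q.1)).foldl (fun r m => r.insert m st.1) st.2))
      (((i : Nat) : Int) + 1, d)).2 = pvBuild (pvGrp mp) kss i d := by
  induction kss with
  | nil => intro i d; rfl
  | cons p t ih =>
    intro i d
    simp only [List.foldl_cons, pvBuild]
    have hfold : ((pvGrp mp p).map (fun q => q.1)).foldl (fun r m => r.insert m (((i : Nat) : Int) + 1)) d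
        = (pvGrp mp p).foldl (fun d q => d.insert q.1 ((i : Int) + 1)) d := by
      rw [List.foldl_map]
    have hlen : ((i : Nat) : Int) + 1 + ((pvGrp mp p).map (fun q => q.1)).length
        = (((i + (pvGrp mp p).length : Nat) : Int)) + 1 := by
      simp; omega
    rw [hfold, hlen]
    exact ih (i + (pvGrp mp p).length) _

-- ===== VERDICT (by name: the statement is the Claim_ definition above) =====
theorem calculate_league_positions_spec : Claim_equal_calculate_league_positions := by
  unfold Claim_equal_calculate_league_positions
  intro hm gw _ _
  unfold Spec_calculate_league_positions calculate_league_positions calculate_league_positions_alt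
  by_cases h1 : (PySem.Dict.ofList hm).items = []
  · simp [h1]
  · rw [if_neg h1, if_neg h1]
    set mp := pvManagerPoints (PySem.Dict.ofList hm).items gw with hmp
    by_cases h2 : mp = []
    · simp [h2]
    · rw [if_neg h2, if_neg h2]
      -- A's side
      have hA : pvALoop (PySem.List.sorted mp (fun x => x.2) true)
          (PySem.List.sorted mp (fun x => x.2) true) 0 1 PySem.Dict.empty
          = pvBuild (pvGrp mp) (pvKs mp) 0 PySem.Dict.empty := by
        have h0 := pvALoop_eq_pvPLoop (PySem.List.sorted mp (fun x => x.2) true) [] 1 PySem.Dict.empty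
        simp only [List.nil_append, List.length_nil, List.getLast?_nil, Option.map_none] at h0
        rw [h0, pvSorted_blocks mp]
        exact pvPLoop_flat (pvGrp mp) (pvKs mp) none 0 1 PySem.Dict.empty
          (fun p _ => pvGrp_mem mp p) (pvKs_pairwise mp)
          (fun p hp => pvGrp_ne_nil mp p hp)
          (fun p _ pp hpp => by cases hpp)
          (fun _ => rfl) (fun _ => rfl)
      -- B's side
      have hB : ((PySem.List.sorted
            (mp.foldl (fun g q => g.modify q.2 [] (fun l => l ++ [q.1])) PySem.Dict.empty).keys
            (fun k => k) true).foldl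
          (fun (st : Int × PySem.Dict Int Int) p =>
            (st.1 + ((mp.foldl (fun g q => g.modify q.2 [] (fun l => l ++ [q.1])) PySem.Dict.empty).getD p []).length,
             ((mp.foldl (fun g q => g.modify q.2 [] (fun l => l ++ [q.1])) PySem.Dict.empty).getD p []).foldl
               (fun r m => r.insert m st.1) st.2)) (1, PySem.Dict.empty)).2
          = pvBuild (pvGrp mp) (pvKs mp) 0 PySem.Dict.empty := by
        have hkeys : PySem.List.sorted
            (mp.foldl (fun g q => g.modify q.2 [] (fun l => l ++ [q.1])) PySem.Dict.empty).keys
            (fun k => k) true = pvKs mp := by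
          rw [pvGroups_keys]; rfl
        rw [hkeys]
        simp only [pvGroups_getD]
        have := pvBLoop mp (pvKs mp) 0 PySem.Dict.empty
        simpa using this
      exact congrArg PySem.Dict.items (hA.trans hB.symm)
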